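-- pv_equiv track=rewrite | github.com/makarandsk/mychessgame | src/game/chess_logic.py | can_knight_attack
-- ===== SOURCE A (Python) =====
-- def can_knight_attack(from_row: int, from_col: int, to_row: int, to_col: int) -> bool:
--     """Check if knight can attack target position."""
--     knight_moves = [
--         (-2, -1), (-2, 1), (-1, -2), (-1, 2),
--         (1, -2), (1, 2), (2, -1), (2, 1)
--     ]
--
--     for drow, dcol in knight_moves:
--         if from_row + drow == to_row and from_col + dcol == to_col:
--             return True
--
--     return False
-- ===== SOURCE B (Python) =====
-- def can_knight_attack(from_row: int, from_col: int, to_row: int, to_col: int) -> bool: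
--     """Check if knight can attack target position (closed form)."""
--     return abs(from_row - to_row) * abs(from_col - to_col) == 2
-- ===== Notes on version B (the rewrite author's own statement) =====
-- stated objective: idiomatic
-- what changed: Replaced the scan over the 8 knight-offset tuples with the closed-form displacement test abs(dr)*abs(dc) == 2.
import Mathlib
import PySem

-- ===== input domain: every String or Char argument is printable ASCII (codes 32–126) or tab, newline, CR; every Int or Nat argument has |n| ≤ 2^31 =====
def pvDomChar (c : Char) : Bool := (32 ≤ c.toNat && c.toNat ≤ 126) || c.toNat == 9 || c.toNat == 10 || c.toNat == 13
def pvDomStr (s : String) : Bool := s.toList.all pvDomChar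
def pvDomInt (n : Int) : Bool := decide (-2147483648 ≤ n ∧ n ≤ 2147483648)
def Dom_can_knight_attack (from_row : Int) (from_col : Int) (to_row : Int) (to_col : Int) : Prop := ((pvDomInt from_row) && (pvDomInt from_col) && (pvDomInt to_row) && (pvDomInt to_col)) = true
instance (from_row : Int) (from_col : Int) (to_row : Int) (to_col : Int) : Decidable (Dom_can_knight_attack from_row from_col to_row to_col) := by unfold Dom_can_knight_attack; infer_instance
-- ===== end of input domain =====

-- B replaces A's scan over the 8 knight-offset tuples with the closed-form test |dr|*|dc| == 2 (idiomatic).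


-- ===== PORT A =====
-- loop over the 8 offsets with early return True
def can_knight_attack (from_row : Int) (from_col : Int) (to_row : Int) (to_col : Int) : Bool :=
  let knight_moves : List (Int × Int) :=
    [(-2, -1), (-2, 1), (-1, -2), (-1, 2),
     (1, -2), (1, 2), (2, -1), (2, 1)]
  knight_moves.any (fun (m : Int × Int) =>
    from_row + m.1 == to_row && from_col + m.2 == to_col)

-- ===== PORT B =====
def can_knight_attack_alt (from_row : Int) (from_col : Int) (to_row : Int) (to_col : Int) : Bool :=
  (from_row - to_row).natAbs * (from_col - to_col).natAbs == 2

-- ===== PRECONDITION & SPEC =====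
def Spec_can_knight_attack (from_row : Int) (from_col : Int) (to_row : Int) (to_col : Int) (out : Bool) : Prop := out = can_knight_attack_alt from_row from_col to_row to_col
instance (from_row : Int) (from_col : Int) (to_row : Int) (to_col : Int) (out : Bool) : Decidable (Spec_can_knight_attack from_row from_col to_row to_col out) := by unfold Spec_can_knight_attack; infer_instance

-- ===== CLAIM (what is proved, stated in full; the proofs are below) =====
def Claim_equal_can_knight_attack : Prop := ∀ (from_row : Int) (from_col : Int) (to_row : Int) (to_col : Int), Dom_can_knight_attack from_row from_col to_row to_col → Spec_can_knight_attack from_row from_col to_row to_col (can_knight_attack from_row from_col to_row to_col)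

-- ===== LEMMAS AND PROOFS =====

-- ===== VERDICT (by name: the statement is the Claim_ definition above) =====
-- a*b = 2 over ℕ iff {a,b} = {1,2}
theorem pv_mul_eq_two (a b : Nat) : a * b = 2 ↔ (a = 1 ∧ b = 2) ∨ (a = 2 ∧ b = 1) := by
  constructor
  · intro h
    have ha : a ≤ 2 := Nat.le_of_dvd (by norm_num) ⟨b, h.symm⟩
    interval_cases a <;> omega
  · rintro (⟨h1, h2⟩ | ⟨h1, h2⟩) <;> subst h1 <;> subst h2 <;> rfl

-- ===== VERDICT (by name: the statement is the Claim_ definition above) =====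
theorem can_knight_attack_spec : Claim_equal_can_knight_attack := by
  intro fr fc tr tc _
  unfold Spec_can_knight_attack can_knight_attack can_knight_attack_alt
  rw [Bool.eq_iff_iff]
  simp only [List.any_cons, List.any_nil, Bool.or_false, Bool.or_eq_true,
    Bool.and_eq_true, beq_iff_eq]
  rw [pv_mul_eq_two]
  omega
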